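-- pv_equiv track=rewrite | github.com/Prayag2003/githubify-ethereum-bots-futurestack-hack | server/app/parser/tools/ast_chunker.py | _chunk_with_fallback
-- ===== SOURCE A (Python) =====
-- from typing import List, Dict, Optional
--
-- def _chunk_with_fallback(content: str, file_extension: str) -> List[str]:
--     """Fallback chunking when AST parsing fails."""
--     # Simple line-based chunking as fallback
--     lines = content.split('\n')
--     chunks = []
--     current_chunk = []
--     max_lines = 50  # Maximum lines per fallback chunk
--
--     for line in lines:
--         current_chunk.append(line)
--         if len(current_chunk) >= max_lines:
--             chunk_text = '\n'.join(current_chunk)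
--             if chunk_text.strip():
--                 chunks.append(f"// Fallback chunk for {file_extension}\n{chunk_text}")
--             current_chunk = []
--
--     # Add remaining lines
--     if current_chunk:
--         chunk_text = '\n'.join(current_chunk)
--         if chunk_text.strip():
--             chunks.append(f"// Fallback chunk for {file_extension}\n{chunk_text}")
--
--     return chunks if chunks else [content]
-- ===== SOURCE B (Python) =====
-- from typing import List
--
--
-- def _chunk_with_fallback(content: str, file_extension: str) -> List[str]:
--     """Fallback chunking: slice the line list into 50-line groups, no running buffer."""
--     lines = content.split('\n')
--     chunks = []
--     while lines:
--         group, lines = lines[:50], lines[50:]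
--         text = '\n'.join(group)
--         if text.strip():
--             chunks.append(f"// Fallback chunk for {file_extension}\n{text}")
--     return chunks if chunks else [content]
-- ===== Notes on version B (the rewrite author's own statement) =====
-- stated objective: simpler
-- what changed: B drops A's running current_chunk buffer and length counter: it repeatedly slices the line list into lines[:50] / lines[50:] groups and emits each non-blank group directly.
import Mathlib
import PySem

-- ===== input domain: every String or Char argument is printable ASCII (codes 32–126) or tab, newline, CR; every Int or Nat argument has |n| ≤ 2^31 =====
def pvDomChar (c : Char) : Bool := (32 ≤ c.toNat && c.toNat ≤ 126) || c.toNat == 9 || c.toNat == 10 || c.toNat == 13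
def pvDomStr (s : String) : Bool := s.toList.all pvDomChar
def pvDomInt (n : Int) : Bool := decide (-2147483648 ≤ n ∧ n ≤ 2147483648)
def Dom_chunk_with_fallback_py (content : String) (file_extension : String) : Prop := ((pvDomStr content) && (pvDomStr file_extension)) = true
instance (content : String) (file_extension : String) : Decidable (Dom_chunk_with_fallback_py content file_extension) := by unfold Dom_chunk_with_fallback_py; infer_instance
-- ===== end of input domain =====

-- B replaces A's running line-buffer-and-counter with direct 50-line slices of the line list (objective: simpler).

-- content.split('\n')  (exact: PySem.Chars.splitOn with a nonempty separator)
def pvSplitNL (s : String) : List String :=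
  (PySem.Chars.splitOn s.toList "\n".toList).map String.ofList

-- the f-string "// Fallback chunk for {ext}\n{text}" (same literal in both Pythons)
def pvHeader (ext text : String) : String :=
  PySem.Str.join "" ["// Fallback chunk for ", ext, "\n", text]

-- ===== PORT A =====
-- body of A's for-loop (append to current_chunk, flush at 50 lines)
def pvStepA (ext : String) (st : List String × List String) (line : String) :
    List String × List String :=
  let cur := st.2 ++ [line]
  if 50 ≤ cur.length then
    (if PySem.Str.strip (PySem.Str.join "\n" cur) ≠ "" then
        st.1 ++ [pvHeader ext (PySem.Str.join "\n" cur)]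
      else st.1, [])
  else (st.1, cur)

def chunk_with_fallback_py (content : String) (file_extension : String) : List String :=
  let lines := pvSplitNL content
  let st : List String × List String := lines.foldl (pvStepA file_extension) ([], [])
  let chunks :=
    if st.2 ≠ [] then
      (if PySem.Str.strip (PySem.Str.join "\n" st.2) ≠ "" then
          st.1 ++ [pvHeader file_extension (PySem.Str.join "\n" st.2)]
        else st.1)
    else st.1
  if chunks ≠ [] then chunks else [content]

-- ===== PORT B =====
-- the while-loop of Source B: slice off lines[:50] / lines[50:] each round
def pvGoB (ext : String) (lines : List String) (chunks : List String) : List String :=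
  if h : lines = [] then chunks
  else
    let group := PySem.List.slice lines none (some (50 : Int))
    let rest := PySem.List.slice lines (some (50 : Int)) none
    let text := PySem.Str.join "\n" group
    let chunks' := if PySem.Str.strip text ≠ "" then chunks ++ [pvHeader ext text] else chunks
    pvGoB ext rest chunks'
termination_by lines.length
decreasing_by
  rw [PySem.List.slice_from lines (by norm_num : (0:Int) ≤ 50)]
  cases lines with
  | nil => exact absurd rfl h
  | cons a t => simp

def chunk_with_fallback_py_alt (content : String) (file_extension : String) : List String :=
  let lines := pvSplitNL content
  let chunks := pvGoB file_extension lines []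
  if chunks ≠ [] then chunks else [content]

-- ===== PRECONDITION & SPEC =====
def Spec_chunk_with_fallback_py (content : String) (file_extension : String) (out : List String) : Prop := out = chunk_with_fallback_py_alt content file_extension
instance (content : String) (file_extension : String) (out : List String) : Decidable (Spec_chunk_with_fallback_py content file_extension out) := by unfold Spec_chunk_with_fallback_py; infer_instance

-- ===== CLAIM (what is proved, stated in full; the proofs are below) =====
def Claim_equal_chunk_with_fallback_py : Prop := ∀ (content : String) (file_extension : String), Dom_chunk_with_fallback_py content file_extension → Spec_chunk_with_fallback_py content file_extension (chunk_with_fallback_py content file_extension)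

-- ===== LEMMAS AND PROOFS =====

-- the chunk emitted for a full or final group ys (nothing, if it strips blank)
def pvEmit (ext : String) (ys : List String) : List String :=
  if PySem.Str.strip (PySem.Str.join "\n" ys) ≠ "" then [pvHeader ext (PySem.Str.join "\n" ys)] else []

-- A's post-loop finalisation
def pvFin (ext : String) (st : List String × List String) : List String :=
  if st.2 ≠ [] then
    (if PySem.Str.strip (PySem.Str.join "\n" st.2) ≠ "" then
        st.1 ++ [pvHeader ext (PySem.Str.join "\n" st.2)]
      else st.1)
  else st.1

theorem pvStepA_small (ext line : String) (acc cur : List String)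
    (h : ¬ 50 ≤ (cur ++ [line]).length) :
    pvStepA ext (acc, cur) line = (acc, cur ++ [line]) := by
  simp only [pvStepA]; rw [if_neg h]

theorem pvStepA_flush (ext line : String) (acc cur : List String)
    (h : 50 ≤ (cur ++ [line]).length) :
    pvStepA ext (acc, cur) line = (acc ++ pvEmit ext (cur ++ [line]), []) := by
  simp only [pvStepA, pvEmit]; rw [if_pos h]
  split_ifs <;> simp

theorem pvFoldA_small (ext : String) :
    ∀ (ys : List String) (acc cur : List String), cur.length + ys.length < 50 →
      List.foldl (pvStepA ext) (acc, cur) ys = (acc, cur ++ ys) := by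
  intro ys
  induction ys with
  | nil => intro acc cur _; simp
  | cons y t ih =>
    intro acc cur h
    rw [List.foldl_cons, pvStepA_small ext y acc cur (by simp at h ⊢; omega)]
    rw [ih acc (cur ++ [y]) (by simp at h ⊢; omega)]
    simp

theorem pvFoldA_full (ext : String) :
    ∀ (ys : List String) (acc cur : List String), ys ≠ [] → cur.length + ys.length = 50 →
      List.foldl (pvStepA ext) (acc, cur) ys = (acc ++ pvEmit ext (cur ++ ys), []) := by
  intro ys
  induction ys with
  | nil => intro _ _ h _; exact absurd rfl h
  | cons y t ih =>
    intro acc cur _ hlen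
    cases t with
    | nil =>
      rw [List.foldl_cons, pvStepA_flush ext y acc cur (by simp at hlen ⊢; omega)]
      simp
    | cons z t' =>
      rw [List.foldl_cons, pvStepA_small ext y acc cur (by simp at hlen ⊢; omega)]
      rw [ih acc (cur ++ [y]) (by simp) (by simp at hlen ⊢; omega)]
      simp

theorem pvGoB_unfold (ext : String) (lines chunks : List String) (h : lines ≠ []) :
    pvGoB ext lines chunks =
      pvGoB ext (lines.drop 50) (chunks ++ pvEmit ext (lines.take 50)) := by
  rw [pvGoB]
  simp only [dif_neg h]
  rw [PySem.List.slice_from lines (by norm_num : (0:Int) ≤ 50),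
      PySem.List.slice_to lines (by norm_num : (0:Int) ≤ 50)]
  have h50 : ((50:Int)).toNat = 50 := rfl
  rw [h50]
  simp only [pvEmit]
  split_ifs <;> simp

theorem pvGoB_nil (ext : String) (chunks : List String) : pvGoB ext [] chunks = chunks := by
  rw [pvGoB]; simp

theorem pvMain (ext : String) :
    ∀ (n : Nat) (lines acc : List String), lines.length ≤ n →
      pvFin ext (List.foldl (pvStepA ext) (acc, []) lines) = pvGoB ext lines acc := by
  intro n
  induction n with
  | zero =>
    intro lines acc h
    have : lines = [] := List.eq_nil_of_length_eq_zero (Nat.le_zero.mp h)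
    subst this
    rw [pvGoB_nil]; simp [pvFin]
  | succ n ih =>
    intro lines acc h
    by_cases hnil : lines = []
    · subst hnil; rw [pvGoB_nil]; simp [pvFin]
    · by_cases h50 : lines.length < 50
      · rw [pvFoldA_small ext lines acc [] (by simpa using h50)]
        rw [pvGoB_unfold ext lines acc hnil]
        have hd : lines.drop 50 = [] := List.drop_eq_nil_of_le (by omega)
        have ht : lines.take 50 = lines := List.take_of_length_le (by omega)
        rw [hd, ht, pvGoB_nil]
        simp only [pvFin, pvEmit, List.nil_append, if_pos hnil]
        split_ifs <;> simp
      · rw [Nat.not_lt] at h50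
        have hsplit : lines = lines.take 50 ++ lines.drop 50 := (List.take_append_drop 50 lines).symm
        conv_lhs => rw [hsplit]
        rw [List.foldl_append]
        rw [pvFoldA_full ext (lines.take 50) acc [] (by
              intro hc
              have := congrArg List.length hc
              simp [Nat.min_eq_left h50] at this)
            (by simp [Nat.min_eq_left h50])]
        simp only [List.nil_append]
        rw [ih (lines.drop 50) (acc ++ pvEmit ext (lines.take 50)) (by simp; omega)]
        rw [pvGoB_unfold ext lines acc hnil]

-- ===== VERDICT (by name: the statement is the Claim_ definition above) =====
theorem chunk_with_fallback_py_spec : Claim_equal_chunk_with_fallback_py := by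
  intro content ext _
  unfold Spec_chunk_with_fallback_py
  have h := pvMain ext (pvSplitNL content).length (pvSplitNL content) [] (le_refl _)
  simp only [pvFin] at h
  simp only [chunk_with_fallback_py, chunk_with_fallback_py_alt]
  rw [h]
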